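-- pv_equiv track=rewrite | github.com/baekjs0123/SWEA | 16118. 1일차 - 구간합.py | max_min_difference
-- ===== SOURCE A (Python) =====
-- def max_min_difference(N, M, array):
--     # 초기 윈도우의 합 계산
--     current_sum = sum(array[:M])
--     max_sum = current_sum
--     min_sum = current_sum
--
--     # 슬라이딩 윈도우를 사용하여 합 계산
--     for i in range(1, N - M + 1):
--         # 새로운 합 = 이전 합 - 이전 윈도우의 첫 번째 값 + 새로운 윈도우의 마지막 값
--         current_sum = current_sum - array[i - 1] + array[i + M - 1]
--         # 최대값과 최소값 갱신
--         if current_sum > max_sum: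
--             max_sum = current_sum
--         if current_sum < min_sum:
--             min_sum = current_sum
--
--     # 최대값과 최소값의 차이 반환
--     return max_sum - min_sum
-- ===== SOURCE B (Python) =====
-- def max_min_difference(N, M, array):
--     # Prefix-sum table, then window sums as differences of prefix sums.
--     prefix = [0]
--     for x in array:
--         prefix.append(prefix[-1] + x)
--     if M >= N:
--         return 0  # at most one window: max and min coincide
--     sums = [prefix[i + M] - prefix[i] for i in range(N - M + 1)]
--     return max(sums) - min(sums)
-- ===== Notes on version B (the rewrite author's own statement) =====
-- stated objective: alternative
-- what changed: Replaces the incremental subtract-add sliding scan with running max/min by building a prefix-sum table, forming all window sums as prefix differences, and reducing them with max and min.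
-- outside the precondition, e.g. on max_min_difference(-1, -2, [1, 2, 3]): A returns 1, B returns 2
import Mathlib
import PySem

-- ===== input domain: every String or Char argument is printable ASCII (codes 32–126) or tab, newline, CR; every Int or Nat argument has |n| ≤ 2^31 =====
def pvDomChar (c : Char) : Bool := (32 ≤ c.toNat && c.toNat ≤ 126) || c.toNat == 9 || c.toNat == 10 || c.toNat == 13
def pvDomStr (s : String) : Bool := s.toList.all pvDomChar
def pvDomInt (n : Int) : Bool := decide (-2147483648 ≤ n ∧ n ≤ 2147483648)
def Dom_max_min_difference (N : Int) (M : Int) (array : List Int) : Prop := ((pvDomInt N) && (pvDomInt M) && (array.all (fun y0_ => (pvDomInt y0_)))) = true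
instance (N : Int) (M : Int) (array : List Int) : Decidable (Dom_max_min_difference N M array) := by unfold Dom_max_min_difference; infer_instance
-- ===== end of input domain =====

-- B: a prefix-sum table, window sums as prefix differences, reduced by max/min (alternative decomposition, same cost).


-- ===== PORT A =====
-- literal port of A: initial window sum, then a sliding subtract-add loop keeping running max/min.
-- array[i-1] / array[i+M-1] are ported as pyGetD with default 0: exact under Pre_, where both indices are in range.
def max_min_difference (N : Int) (M : Int) (array : List Int) : Int :=
  let current_sum := (PySem.List.slice array none (some M)).sum
  let st := (PySem.List.pyRange 1 (N - M + 1) 1).foldl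
    (fun (st : Int × Int × Int) i =>
      let c := st.1 - PySem.List.pyGetD array (i - 1) 0 + PySem.List.pyGetD array (i + M - 1) 0
      let mx := if c > st.2.1 then c else st.2.1
      let mn := if c < st.2.2 then c else st.2.2
      (c, mx, mn))
    (current_sum, current_sum, current_sum)
  st.2.1 - st.2.2

-- ===== PORT B =====
-- literal port of Source B. prefix[-1] and the prefix[...] lookups are pyGetD with default 0 (exact under Pre_:
-- the list is nonempty resp. the indices are in range); max()/min() are max?/min? with .getD 0, exact here
-- since `sums` is nonempty on the branch M < N.
def max_min_difference_alt (N : Int) (M : Int) (array : List Int) : Int :=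
  let pfx := array.foldl (fun acc x => acc ++ [PySem.List.pyGetD acc (-1) 0 + x]) [(0 : Int)]
  if M ≥ N then 0
  else
    let sums := (PySem.List.pyRange 0 (N - M + 1) 1).map
      (fun i => PySem.List.pyGetD pfx (i + M) 0 - PySem.List.pyGetD pfx i 0)
    (PySem.List.max? sums (fun x => x)).getD 0 - (PySem.List.min? sums (fun x => x)).getD 0

-- ===== PRECONDITION & SPEC =====
-- Pre_ keeps the natural domain: a nonnegative window size M and either N within the array length or the
-- degenerate single-window case N ≤ M. It excludes negative M (a meaningless window size, where both
-- programs' values are accidents of Python's negative-index wraparound, and A often raises IndexError)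
-- and N > max(len(array), M), where A raises IndexError.
def Pre_max_min_difference (N : Int) (M : Int) (array : List Int) : Prop :=
  0 ≤ M ∧ (N ≤ (array.length : Int) ∨ N ≤ M)
instance (N : Int) (M : Int) (array : List Int) : Decidable (Pre_max_min_difference N M array) := by
  unfold Pre_max_min_difference; infer_instance
def pvWitness_max_min_difference : Int × Int × List Int := (3, 2, [1, 2, 3])

def Spec_max_min_difference (N : Int) (M : Int) (array : List Int) (out : Int) : Prop := out = max_min_difference_alt N M array
instance (N : Int) (M : Int) (array : List Int) (out : Int) : Decidable (Spec_max_min_difference N M array out) := by unfold Spec_max_min_difference; infer_instance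

-- ===== CLAIM (what is proved, stated in full; the proofs are below) =====
def Claim_equal_max_min_difference : Prop := ∀ (N : Int) (M : Int) (array : List Int), Dom_max_min_difference N M array → Pre_max_min_difference N M array → Spec_max_min_difference N M array (max_min_difference N M array)

-- ===== LEMMAS AND PROOFS =====

-- prefix sums: pvP a k = sum(a[:k])
def pvP (a : List Int) (k : Nat) : Int := (a.take k).sum
-- window sums: pvW a m k = sum(a[k:k+m])
def pvW (a : List Int) (m k : Nat) : Int := pvP a (k + m) - pvP a k

theorem pvP_succ (a : List Int) (j : Nat) (hj : j < a.length) :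
    pvP a (j + 1) = pvP a j + a.getD j 0 := by
  unfold pvP
  rw [List.take_add_one, List.sum_append]
  simp [List.getElem?_eq_getElem hj, List.getD]

-- the prefix-building foldl of Source B produces exactly [pvP a 0, …, pvP a len]
theorem prefix_eq (a : List Int) :
    a.foldl (fun acc x => acc ++ [PySem.List.pyGetD acc (-1) 0 + x]) [(0 : Int)]
      = (List.range (a.length + 1)).map (pvP a) := by
  induction a using List.reverseRecOn with
  | nil => simp [pvP]
  | append_singleton xs y ih =>
    rw [List.foldl_append, ih]
    simp only [List.foldl_cons, List.foldl_nil]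
    have h1 : (List.range (xs.length + 1)).map (pvP xs)
        = (List.range xs.length).map (pvP xs) ++ [pvP xs xs.length] := by
      rw [List.range_succ, List.map_append]; rfl
    rw [h1, PySem.List.pyGetD_neg_one_append_singleton]
    have h2 : ∀ k, k ≤ xs.length → pvP (xs ++ [y]) k = pvP xs k := by
      intro k hk; simp [pvP, List.take_append_of_le_length hk]
    have h3 : (List.range (xs.length + 1 + 1)).map (pvP (xs ++ [y]))
        = (List.range xs.length).map (pvP xs) ++ [pvP xs xs.length] ++ [pvP (xs ++ [y]) (xs.length + 1)] := by
      rw [List.range_succ, List.map_append, List.range_succ, List.map_append]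
      congr 2
      · exact List.map_congr_left (fun k hk => h2 k (le_of_lt (List.mem_range.mp hk)))
      · simp [h2 xs.length le_rfl]
    simp only [List.length_append, List.length_singleton, h3]
    have h4 : pvP (xs ++ [y]) (xs.length + 1) = pvP xs xs.length + y := by
      simp [pvP]
    rw [h4]

-- indexing the prefix table
theorem pyGetD_prefix (a : List Int) (k : Nat) (hk : k ≤ a.length) :
    PySem.List.pyGetD ((List.range (a.length + 1)).map (pvP a)) (k : Int) 0 = pvP a k := by
  rw [PySem.List.pyGetD_natCast]
  have hk' : k < ((List.range (a.length + 1)).map (pvP a)).length := by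
    simpa using Nat.lt_succ_of_le hk
  rw [List.getD_eq_getElem _ _ hk']
  simp

-- the sliding-window step of A computes the next window sum
theorem pvW_succ (a : List Int) (m k : Nat) (hk : k + m < a.length) :
    pvW a m (k + 1) = pvW a m k - a.getD k 0 + a.getD (k + m) 0 := by
  unfold pvW
  have h1 : k + 1 + m = (k + m) + 1 := by omega
  rw [h1, pvP_succ a (k + m) hk, pvP_succ a k (by omega)]
  ring

-- invariant of A's loop
theorem a_loop (a : List Int) (N M : Int) (hM : 0 ≤ M) (hNL : N ≤ (a.length : Int))
    (t : Nat) (ht : (t : Int) ≤ N - M) :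
    (PySem.List.pyRange 1 (1 + (t : Int)) 1).foldl
      (fun (st : Int × Int × Int) i =>
        let c := st.1 - PySem.List.pyGetD a (i - 1) 0 + PySem.List.pyGetD a (i + M - 1) 0
        let mx := if c > st.2.1 then c else st.2.1
        let mn := if c < st.2.2 then c else st.2.2
        (c, mx, mn))
      (pvW a M.toNat 0, pvW a M.toNat 0, pvW a M.toNat 0)
    = (pvW a M.toNat t,
       ((List.range t).map (fun k => pvW a M.toNat (k + 1))).foldl max (pvW a M.toNat 0),
       ((List.range t).map (fun k => pvW a M.toNat (k + 1))).foldl min (pvW a M.toNat 0)) := by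
  induction t with
  | zero => simp [PySem.List.pyRange_one_eq_nil]
  | succ t ih =>
    have hMt : ((M.toNat : Int)) = M := Int.toNat_of_nonneg hM
    have ht' : (t : Int) ≤ N - M := by push_cast at ht ⊢; omega
    have hsplit : PySem.List.pyRange 1 (1 + ((t : Nat) + 1 : Nat)) 1
        = PySem.List.pyRange 1 (1 + (t : Int)) 1 ++ [1 + (t : Int)] := by
      have := PySem.List.pyRange_one_succ_right (a := 1) (b := 1 + (t : Int)) (by omega)
      push_cast
      exact this
    rw [hsplit, List.foldl_append, ih ht']
    simp only [List.foldl_cons, List.foldl_nil]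
    have e1 : (1 + (t : Int)) - 1 = ((t : Nat) : Int) := by omega
    have e2 : (1 + (t : Int)) + M - 1 = (((t + M.toNat : Nat)) : Int) := by push_cast; omega
    rw [e1, e2, PySem.List.pyGetD_natCast, PySem.List.pyGetD_natCast]
    have hbound : t + M.toNat < a.length := by
      have : ((t + M.toNat : Nat) : Int) < (a.length : Int) := by push_cast; omega
      exact_mod_cast this
    have hc : pvW a M.toNat t - a.getD t 0 + a.getD (t + M.toNat) 0 = pvW a M.toNat (t + 1) :=
      (pvW_succ a M.toNat t hbound).symm
    simp only [List.getD_eq_getElem?_getD] at hc ⊢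
    rw [hc]
    have hmax : ∀ x c : Int, (if c > x then c else x) = max x c := by
      intro x c; rw [max_def]; split_ifs <;> omega
    have hmin : ∀ x c : Int, (if c < x then c else x) = min x c := by
      intro x c; rw [min_def]; split_ifs <;> omega
    rw [hmax, hmin, List.range_succ, List.map_append, List.foldl_append, List.foldl_append]
    simp

-- ===== VERDICT (by name: the statement is the Claim_ definition above) =====
theorem max_min_difference_spec : Claim_equal_max_min_difference := by
  intro N M a _ hPre
  obtain ⟨hM, hcase⟩ := hPre
  unfold Spec_max_min_difference max_min_difference max_min_difference_alt
  by_cases hMN : M ≥ N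
  · rw [if_pos hMN, PySem.List.pyRange_one_eq_nil (by omega : N - M + 1 ≤ 1)]
    simp
  · have hNle : N ≤ (a.length : Int) := by
      rcases hcase with h | h
      · exact h
      · omega
    push Not at hMN
    rw [if_neg (by omega : ¬ M ≥ N)]
    have hMt : ((M.toNat : Int)) = M := Int.toNat_of_nonneg hM
    have htc : (((N - M).toNat : Int)) = N - M := Int.toNat_of_nonneg (by omega)
    -- A side
    have hinit : (PySem.List.slice a none (some M)).sum = pvW a M.toNat 0 := by
      rw [PySem.List.slice_to a hM]; simp [pvW, pvP]
    have hb : N - M + 1 = 1 + (((N - M).toNat : Nat) : Int) := by omega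
    have hA := a_loop a N M hM hNle (N - M).toNat (by omega)
    dsimp only
    rw [hb, hinit, hA]
    -- B side
    rw [prefix_eq]
    have hrange : PySem.List.pyRange 0 (1 + (((N - M).toNat : Nat) : Int)) 1
        = (List.range ((N - M).toNat + 1)).map (fun k => ((k : Nat) : Int)) := by
      rw [PySem.List.pyRange_one]
      have : (1 + (((N - M).toNat : Nat) : Int) - 0).toNat = (N - M).toNat + 1 := by omega
      rw [this]
      exact List.map_congr_left (fun k _ => by omega)
    rw [hrange, List.map_map]
    have hsums : (List.range ((N - M).toNat + 1)).map
        ((fun i => PySem.List.pyGetD ((List.range (a.length + 1)).map (pvP a)) (i + M) 0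
                 - PySem.List.pyGetD ((List.range (a.length + 1)).map (pvP a)) i 0) ∘ (fun k => ((k : Nat) : Int)))
        = (List.range ((N - M).toNat + 1)).map (pvW a M.toNat) := by
      refine List.map_congr_left (fun k hk => ?_)
      have hk' : k ≤ (N - M).toNat := by
        have := List.mem_range.mp hk; omega
      have hkm : k + M.toNat ≤ a.length := by
        have : ((k + M.toNat : Nat) : Int) ≤ (a.length : Int) := by push_cast; omega
        exact_mod_cast this
      have e1 : ((k : Nat) : Int) + M = (((k + M.toNat : Nat)) : Int) := by push_cast; omega
      simp only [Function.comp]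
      rw [e1, pyGetD_prefix a (k + M.toNat) hkm, pyGetD_prefix a k (by omega)]
      rfl
    rw [hsums, List.range_succ_eq_map, List.map_cons, List.map_map,
        PySem.List.max?_id_cons, PySem.List.min?_id_cons]
    have : (pvW a M.toNat ∘ Nat.succ) = fun k => pvW a M.toNat (k + 1) := by
      funext k; simp [Nat.succ_eq_add_one]
    rw [this]
    simp
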